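-- pv_equiv track=rewrite | github.com/Loganathankumar/DataEnginner | DataEngineeringPOC/POC/POC2/PythonCodingPOC 1.1/Abbreviation.py | abbreviate_words_using_diff_techniques
-- ===== SOURCE A (Python) =====
-- def abbreviate_words_using_diff_techniques(words):
--     try:
--         # Split into words
--         words = words.split()
--         result = []
--
--         # This Function to check if a character is a vowel
--         def is_vowel(char):
--             return char.lower() in 'aeiou'
--
--         for word in words:
--             # If the word has 3 or less letters, do not abbreviate
--             if len(word) <= 3:
--                 result.append(word)
--                 continue
--
--             # Check if the first letter or first two letters are vowels
--             if is_vowel(word[0]) or (len(word) > 1 and is_vowel(word[1])):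
--                 result.append(word)
--                 continue
--
--             # Abbreviate repeated consonants and remove vowels
--             abbreviated_word = ""
--             previous_char = ""
--             count = 0
--
--             for char in word:
--                 if char.lower() == previous_char.lower():
--                     count += 1
--                 else:
--                     if count > 1:  # If there were repeated consonants, abbreviate them
--                         abbreviated_word += previous_char + str(count)
--                     elif previous_char != "":
--                         abbreviated_word += previous_char
--
--                     previous_char = char
--                     count = 1
--
--             # Handle the last character(s)
--             if count > 1:
--                 abbreviated_word += previous_char + str(count)
--             else:
--                 abbreviated_word += previous_char
--
--             # Remove vowels from the abbreviation
--             abbreviated_word = ''.join([c for c in abbreviated_word if not is_vowel(c)])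
--
--             # Limit to maximum of 5 characters
--             abbreviated_word = abbreviated_word[:5]
--
--             result.append(abbreviated_word)
--
--         final_result = ' '.join(result)
--
--         # Stop abbreviating if total length is less than or equal to 60
--         if len(final_result) <= 60:
--             return final_result
--
--         return ' '.join(result)[:60]  # Return only up to the first 60 characters
--
--     except Exception as e:
--         return str(e)
-- ===== SOURCE B (Python) =====
-- def abbreviate_words_using_diff_techniques(words):
--     vowels = 'aeiou'
--
--     def runs(word):
--         # chunk the word into maximal case-insensitive runs by repeatedly
--         # slicing off the leading run; emit the head only when it is a
--         # consonant and the length only when > 1 (vowel elision fused in,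
--         # run-length digits are never vowels)
--         out = ''
--         while word:
--             n = 1
--             while n < len(word) and word[n].lower() == word[0].lower():
--                 n += 1
--             if word[0].lower() not in vowels:
--                 out += word[0]
--             if n > 1:
--                 out += str(n)
--             word = word[n:]
--         return out
--
--     def abbr(word):
--         if len(word) <= 3 or word[0].lower() in vowels or word[1].lower() in vowels:
--             return word
--         return runs(word)[:5]
--
--     return ' '.join(abbr(w) for w in words.split())[:60]
-- ===== Notes on version B (the rewrite author's own statement) =====
-- stated objective: simpler
-- what changed: Replaces A's per-character previous_char/count state machine plus a separate vowel-filter pass and duplicated 60-char return branches by chunking each word into maximal runs via slicing, with the vowel elision fused into run emission (no intermediate encoded string), the three skip-guards merged into one condition and a single unconditional [:60].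
import Mathlib
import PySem

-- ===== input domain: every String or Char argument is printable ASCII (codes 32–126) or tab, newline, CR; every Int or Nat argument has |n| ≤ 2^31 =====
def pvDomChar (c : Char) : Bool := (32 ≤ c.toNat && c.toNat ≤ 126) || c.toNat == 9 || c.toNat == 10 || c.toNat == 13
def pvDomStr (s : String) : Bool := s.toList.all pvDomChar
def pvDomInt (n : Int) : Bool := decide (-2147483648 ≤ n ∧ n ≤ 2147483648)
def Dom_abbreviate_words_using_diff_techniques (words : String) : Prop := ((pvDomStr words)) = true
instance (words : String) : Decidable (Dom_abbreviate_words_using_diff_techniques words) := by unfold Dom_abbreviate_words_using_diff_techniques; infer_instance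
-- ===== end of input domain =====

-- B replaces A's per-char previous_char/count state machine and separate vowel-filter pass by
-- slicing each word into maximal runs with the vowel elision fused into run emission (objective: simpler).

-- ===== PORT A =====
def isVowelA (c : Char) : Bool := ("aeiou".toList).contains (PySem.Chars.lowerChar c)

-- flush: `if count > 1: ab += prev + str(count) elif prev != "": ab += prev`.
-- prev is Option Char (Python's "" = none); count > 1 is only reachable with prev ≠ "".
def flushA (ab : List Char) (prev : Option Char) (n : Int) : List Char :=
  match prev with
  | none => ab
  | some p => if n > 1 then ab ++ p :: PySem.Int.toChars n else ab ++ [p]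

-- one iteration of A's inner `for char in word` loop, state (abbreviated_word, previous_char, count)
def stepA (st : List Char × Option Char × Int) (c : Char) : List Char × Option Char × Int :=
  if (match st.2.1 with
      | some p => PySem.Chars.lowerChar c == PySem.Chars.lowerChar p
      | none => false)
  then (st.1, st.2.1, st.2.2 + 1)
  else (flushA st.1 st.2.1 st.2.2, some c, 1)

-- A's body for one word (the `continue`s become if-branches); word[0]/word[1] are
-- guarded in range by the surrounding tests, so getD's default is never used.
def abbrA (word : List Char) : List Char :=
  if word.length ≤ 3 then word
  else if isVowelA (word.getD 0 ' ') || (decide (1 < word.length) && isVowelA (word.getD 1 ' ')) then word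
  else
    PySem.List.slice
      ((flushA (word.foldl stepA ([], none, 0)).1 (word.foldl stepA ([], none, 0)).2.1
          (word.foldl stepA ([], none, 0)).2.2).filter (fun c => !isVowelA c))
      none (some 5)

def abbreviate_words_using_diff_techniques (words : String) : String :=
  let result := (PySem.Chars.split₀ words.toList).map abbrA
  let final := PySem.Chars.join [' '] result
  if final.length ≤ 60 then String.ofList final
  else String.ofList (PySem.List.slice (PySem.Chars.join [' '] result) none (some 60))

-- ===== PORT B =====
def isVowelB (c : Char) : Bool := ("aeiou".toList).contains (PySem.Chars.lowerChar c)

-- Source B's `runs`: slice off the leading maximal case-insensitive run, emit the head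
-- (only if consonant) and the length (only if > 1), continue on the remainder word[n:].
-- The inner index-`while` computing n is the length of the matching prefix of the tail.
def runsB : List Char → List Char
  | [] => []
  | c :: rest =>
      let k := (rest.takeWhile (fun d => PySem.Chars.lowerChar d == PySem.Chars.lowerChar c)).length
      (if isVowelB c then [] else [c]) ++
        (if (1 + (k : Int)) > 1 then PySem.Int.toChars (1 + (k : Int)) else []) ++
        runsB (rest.drop k)
termination_by w => w.length
decreasing_by
  simp only [List.length_drop, List.length_cons]
  omega

def abbrB (word : List Char) : List Char :=
  if (decide (word.length ≤ 3) || isVowelB (word.getD 0 ' ') || isVowelB (word.getD 1 ' ')) then word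
  else (runsB word).take 5

def abbreviate_words_using_diff_techniques_alt (words : String) : String :=
  String.ofList ((PySem.Chars.join [' '] ((PySem.Chars.split₀ words.toList).map abbrB)).take 60)

-- ===== PRECONDITION & SPEC =====
def Spec_abbreviate_words_using_diff_techniques (words : String) (out : String) : Prop := out = abbreviate_words_using_diff_techniques_alt words
instance (words : String) (out : String) : Decidable (Spec_abbreviate_words_using_diff_techniques words out) := by unfold Spec_abbreviate_words_using_diff_techniques; infer_instance

-- ===== CLAIM (what is proved, stated in full; the proofs are below) =====
def Claim_equal_abbreviate_words_using_diff_techniques : Prop := ∀ (words : String), Dom_abbreviate_words_using_diff_techniques words → Spec_abbreviate_words_using_diff_techniques words (abbreviate_words_using_diff_techniques words)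

-- ===== LEMMAS AND PROOFS =====

-- proof-only abstraction of A's inner loop: the encoded text contributed by xs
-- when the current run has head p and count n
def encE (p : Char) (n : Int) : List Char → List Char
  | [] => if n > 1 then p :: PySem.Int.toChars n else [p]
  | c :: xs =>
      if PySem.Chars.lowerChar c == PySem.Chars.lowerChar p
      then encE p (n + 1) xs
      else (if n > 1 then p :: PySem.Int.toChars n else [p]) ++ encE c 1 xs

theorem foldA_encE (xs : List Char) (ab : List Char) (p : Char) (n : Int) :
    flushA (xs.foldl stepA (ab, some p, n)).1 (xs.foldl stepA (ab, some p, n)).2.1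
        (xs.foldl stepA (ab, some p, n)).2.2
      = ab ++ encE p n xs := by
  induction xs generalizing ab p n with
  | nil =>
      simp only [List.foldl_nil, flushA, encE]
      split <;> simp
  | cons c xs ih =>
      by_cases h : PySem.Chars.lowerChar c = PySem.Chars.lowerChar p
      · have hA : stepA (ab, some p, n) c = (ab, some p, n + 1) := by
          simp [stepA, h]
        simp only [List.foldl_cons, hA, encE, h, beq_self_eq_true, if_true]
        exact ih ab p (n + 1)
      · have hc : (PySem.Chars.lowerChar c == PySem.Chars.lowerChar p) = false := by
          rw [beq_eq_false_iff_ne]; exact h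
        have hA : stepA (ab, some p, n) c = (flushA ab (some p) n, some c, 1) := by
          simp [stepA, hc]
        have hf : flushA ab (some p) n = ab ++ (if n > 1 then p :: PySem.Int.toChars n else [p]) := by
          simp only [flushA]; split <;> simp
        simp only [List.foldl_cons, hA, hf]
        rw [ih]
        simp [encE, hc, List.append_assoc]

-- the decimal digits of n > 1 contain no vowel
theorem toDigitsCore_no_vowel (fuel : Nat) (m : Nat) (acc : List Char)
    (hacc : ∀ c ∈ acc, (!isVowelA c) = true) :
    ∀ c ∈ Nat.toDigitsCore 10 fuel m acc, (!isVowelA c) = true := by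
  induction fuel generalizing m acc with
  | zero => simpa [Nat.toDigitsCore] using hacc
  | succ fuel ih =>
      have hd : (!isVowelA (Nat.digitChar (m % 10))) = true := by
        have h10 : m % 10 < 10 := Nat.mod_lt _ (by omega)
        interval_cases h : (m % 10) <;> decide
      have hacc' : ∀ c ∈ Nat.digitChar (m % 10) :: acc, (!isVowelA c) = true := by
        intro c hc
        rcases List.mem_cons.mp hc with h | h
        · subst h; exact hd
        · exact hacc c h
      simp only [Nat.toDigitsCore]
      split
      · exact hacc'
      · exact ih _ _ hacc'

theorem toChars_no_vowel (n : Int) (hn : 1 < n) :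
    (PySem.Int.toChars n).filter (fun c => !isVowelA c) = PySem.Int.toChars n := by
  rw [List.filter_eq_self]
  intro c hc
  have : ¬ n < 0 := by omega
  simp only [PySem.Int.toChars, this, if_false, Nat.toDigits] at hc
  exact toDigitsCore_no_vowel _ _ [] (by simp) c hc

theorem emit_filter (p : Char) (n : Int) :
    ((if n > 1 then p :: PySem.Int.toChars n else [p]).filter (fun c => !isVowelA c))
      = (if isVowelB p then [] else [p]) ++ (if n > 1 then PySem.Int.toChars n else []) := by
  have hpv : isVowelB p = isVowelA p := rfl
  by_cases h1 : n > 1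
  · simp only [h1, if_true, List.filter_cons, toChars_no_vowel n h1, hpv]
    by_cases hv : isVowelA p = true <;> simp [hv]
  · simp only [h1, if_false, List.filter_cons, List.filter_nil, List.append_nil, hpv]
    by_cases hv : isVowelA p = true <;> simp [hv]

theorem encE_filter (xs : List Char) (p : Char) (n : Int) (hn : 1 ≤ n) :
    (encE p n xs).filter (fun c => !isVowelA c)
      = (if isVowelB p then [] else [p]) ++
        (if (n + ((xs.takeWhile (fun d => PySem.Chars.lowerChar d == PySem.Chars.lowerChar p)).length : Int)) > 1
         then PySem.Int.toChars (n + ((xs.takeWhile (fun d => PySem.Chars.lowerChar d == PySem.Chars.lowerChar p)).length : Int))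
         else []) ++
        runsB (xs.drop (xs.takeWhile (fun d => PySem.Chars.lowerChar d == PySem.Chars.lowerChar p)).length) := by
  induction xs generalizing p n with
  | nil =>
      simp only [encE, List.takeWhile_nil, List.length_nil, Nat.cast_zero, add_zero,
        List.drop_nil, runsB, List.append_nil]
      exact emit_filter p n
  | cons c xs ih =>
      by_cases h : PySem.Chars.lowerChar c = PySem.Chars.lowerChar p
      · have hb : (PySem.Chars.lowerChar c == PySem.Chars.lowerChar p) = true := by simp [h]
        simp only [encE, hb, if_true, List.takeWhile_cons, List.length_cons]
        rw [ih p (n + 1) (by omega)]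
        have : ((n + 1) + ((xs.takeWhile (fun d => PySem.Chars.lowerChar d == PySem.Chars.lowerChar p)).length : Int))
            = (n + (((xs.takeWhile (fun d => PySem.Chars.lowerChar d == PySem.Chars.lowerChar p)).length : Int) + 1)) := by ring
        simp only [this, Nat.cast_add, Nat.cast_one, List.drop_succ_cons]
      · have hb : (PySem.Chars.lowerChar c == PySem.Chars.lowerChar p) = false := by
          rw [beq_eq_false_iff_ne]; exact h
        simp only [encE, hb, Bool.false_eq_true, if_false, List.takeWhile_cons, List.filter_append,
          List.length_nil, Nat.cast_zero, add_zero, List.drop_zero]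
        rw [emit_filter p n, ih c 1 (by omega)]
        simp [runsB, List.append_assoc]

theorem abbr_eq (word : List Char) : abbrA word = abbrB word := by
  unfold abbrA abbrB
  by_cases h3 : word.length ≤ 3
  · simp [h3]
  · have h1 : 1 < word.length := by omega
    rw [if_neg h3]
    have hg : (decide (word.length ≤ 3) || isVowelB (word.getD 0 ' ') || isVowelB (word.getD 1 ' '))
        = (isVowelA (word.getD 0 ' ') || (decide (1 < word.length) && isVowelA (word.getD 1 ' '))) := by
      rw [show isVowelB = isVowelA from rfl]
      simp [h3, h1]
    rw [hg]
    by_cases hv : (isVowelA (word.getD 0 ' ')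
        || (decide (1 < word.length) && isVowelA (word.getD 1 ' '))) = true
    · rw [if_pos hv, if_pos hv]
    · rw [if_neg hv, if_neg hv]
      rw [PySem.List.slice_to _ (by norm_num : (0:Int) ≤ 5)]
      cases word with
      | nil => simp at h1
      | cons c rest =>
          have hA0 : stepA (([] : List Char), (none : Option Char), (0 : Int)) c
              = ([], some c, 1) := by simp [stepA, flushA]
          simp only [List.foldl_cons, hA0]
          rw [foldA_encE rest [] c 1, List.nil_append,
            encE_filter rest c 1 (by omega)]
          simp only [runsB]
          norm_num
          rfl

theorem abbreviate_eq (words : String) :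
    abbreviate_words_using_diff_techniques words = abbreviate_words_using_diff_techniques_alt words := by
  unfold abbreviate_words_using_diff_techniques abbreviate_words_using_diff_techniques_alt
  have hmap : (PySem.Chars.split₀ words.toList).map abbrA
      = (PySem.Chars.split₀ words.toList).map abbrB := by
    simp [abbr_eq]
  simp only [hmap]
  by_cases h : (PySem.Chars.join [' '] ((PySem.Chars.split₀ words.toList).map abbrB)).length ≤ 60
  · rw [if_pos h, List.take_of_length_le h]
  · rw [if_neg h, PySem.List.slice_to _ (by norm_num : (0:Int) ≤ 60)]
    rfl

-- ===== VERDICT (by name: the statement is the Claim_ definition above) =====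
theorem abbreviate_words_using_diff_techniques_spec : Claim_equal_abbreviate_words_using_diff_techniques := by
  intro words _
  unfold Spec_abbreviate_words_using_diff_techniques
  exact abbreviate_eq words
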